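-- pv_equiv track=rewrite | github.com/IgorKurylo/book-libariry | LibraryService.py | select_max_books
-- ===== SOURCE A (Python) =====
-- import typing
--
-- def select_max_books(mapper_customer_books: typing.Dict):
--     customer_hold_count_books: typing.List = list()
--     max_books = len(mapper_customer_books[list(mapper_customer_books.keys())[0]])
--     # find the max of books
--     for customer in mapper_customer_books:
--         if max_books < len(mapper_customer_books[customer]):
--             max_books = len(mapper_customer_books[customer])
--     # find all customers who hold maximum of books
--     for customer in mapper_customer_books:
--         if max_books == len(mapper_customer_books[customer]):
--             customer_hold_count_books.append(customer)
--
--     return customer_hold_count_books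
-- ===== SOURCE B (Python) =====
-- import typing
--
-- def select_max_books(mapper_customer_books: typing.Dict):
--     # single pass: track the running maximum and rebuild the result on a new maximum
--     result: typing.List = []
--     max_books = -1
--     for customer, books in mapper_customer_books.items():
--         n = len(books)
--         if n > max_books:
--             max_books = n
--             result = [customer]
--         elif n == max_books:
--             result.append(customer)
--     return result
-- ===== Notes on version B (the rewrite author's own statement) =====
-- stated objective: simpler
-- what changed: Replaces A's two full passes (one to find the maximum, one to collect the holders) plus repeated dict lookups with a single pass over .items() that tracks the running maximum and rebuilds the result list when a new maximum appears.
-- crash fix: On the empty dict A raises IndexError (it indexes list(keys())[0]); B returns []. — e.g. on select_max_books([]): A raises IndexError, B returns []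
import Mathlib
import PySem

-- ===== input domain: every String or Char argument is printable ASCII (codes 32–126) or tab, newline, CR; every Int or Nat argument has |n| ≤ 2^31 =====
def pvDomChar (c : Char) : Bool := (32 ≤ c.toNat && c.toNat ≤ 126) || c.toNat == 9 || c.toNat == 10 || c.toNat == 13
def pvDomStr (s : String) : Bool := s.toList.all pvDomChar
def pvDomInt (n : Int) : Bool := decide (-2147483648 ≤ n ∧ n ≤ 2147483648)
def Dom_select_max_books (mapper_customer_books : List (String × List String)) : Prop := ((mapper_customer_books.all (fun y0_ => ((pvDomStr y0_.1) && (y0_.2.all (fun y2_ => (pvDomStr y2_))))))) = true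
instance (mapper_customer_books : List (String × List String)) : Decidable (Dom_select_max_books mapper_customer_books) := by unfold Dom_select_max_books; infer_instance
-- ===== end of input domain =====

-- B replaces A's two passes over the dict (find max, then collect) by one pass that
-- tracks the running maximum and rebuilds the result when a new maximum appears (objective: simpler).

-- ===== PORT A =====
-- first-match association-list lookup = Python dict lookup (keys unique under Pre_);
-- the [] default is never reached since looked-up keys come from the dict itself
def pyDictLookup (m : List (String × List String)) (k : String) : List String :=
  ((m.find? (fun p => p.1 == k)).map Prod.snd).getD []

def select_max_books (mapper_customer_books : List (String × List String)) : List String :=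
  match PySem.List.pyGet? (mapper_customer_books.map Prod.fst) 0 with
  | none => []  -- Python raises IndexError here (empty dict); excluded by Pre_
  | some k0 =>
    let max0 : Int := (pyDictLookup mapper_customer_books k0).length
    let maxB : Int := (mapper_customer_books.map Prod.fst).foldl
      (fun mx c => if mx < ((pyDictLookup mapper_customer_books c).length : Int)
                   then ((pyDictLookup mapper_customer_books c).length : Int) else mx) max0
    (mapper_customer_books.map Prod.fst).foldl
      (fun acc c => if maxB == ((pyDictLookup mapper_customer_books c).length : Int)
                    then acc ++ [c] else acc) []

-- ===== PORT B =====
def select_max_books_alt (mapper_customer_books : List (String × List String)) : List String :=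
  (mapper_customer_books.foldl
    (fun (st : Int × List String) p =>
      let n : Int := p.2.length
      if st.1 < n then (n, [p.1])
      else if n == st.1 then (st.1, st.2 ++ [p.1])
      else st) ((-1 : Int), ([] : List String))).2

-- ===== PRECONDITION & SPEC =====
-- Pre_ excludes the empty mapping, on which A raises IndexError, and association lists with
-- duplicate keys, which do not represent a Python dict (dict keys are unique).
def Pre_select_max_books (mapper_customer_books : List (String × List String)) : Prop :=
  mapper_customer_books ≠ [] ∧ (mapper_customer_books.map Prod.fst).Nodup
instance (mapper_customer_books : List (String × List String)) : Decidable (Pre_select_max_books mapper_customer_books) := by unfold Pre_select_max_books; infer_instance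

def pvWitness_select_max_books : (List (String × List String)) := [("a", ["x"]), ("b", ["y"])]

-- On the empty dict A raises IndexError (it indexes list(keys())[0]); B returns [].
def Raises_select_max_books (mapper_customer_books : List (String × List String)) : Prop :=
  mapper_customer_books = []
instance (mapper_customer_books : List (String × List String)) : Decidable (Raises_select_max_books mapper_customer_books) := by unfold Raises_select_max_books; infer_instance
def pvRaiseWitness_select_max_books : (List (String × List String)) := []
def pvRaiseWitnessOut_select_max_books : List String := []

def Spec_select_max_books (mapper_customer_books : List (String × List String)) (out : List String) : Prop := out = select_max_books_alt mapper_customer_books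
instance (mapper_customer_books : List (String × List String)) (out : List String) : Decidable (Spec_select_max_books mapper_customer_books out) := by unfold Spec_select_max_books; infer_instance

-- ===== CLAIM (what is proved, stated in full; the proofs are below) =====
def Claim_equal_select_max_books : Prop := ∀ (mapper_customer_books : List (String × List String)), Dom_select_max_books mapper_customer_books → Pre_select_max_books mapper_customer_books → Spec_select_max_books mapper_customer_books (select_max_books mapper_customer_books)

def Claim_raises_select_max_books : Prop := (∀ (mapper_customer_books : List (String × List String)), Dom_select_max_books mapper_customer_books → Raises_select_max_books mapper_customer_books → ¬ Pre_select_max_books mapper_customer_books) ∧ (Dom_select_max_books (pvRaiseWitness_select_max_books) ∧ Raises_select_max_books (pvRaiseWitness_select_max_books) ∧ select_max_books_alt (pvRaiseWitness_select_max_books) = pvRaiseWitnessOut_select_max_books)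

-- ===== LEMMAS AND PROOFS =====

-- maximum of the book-list lengths, -1 for the empty list
def pvMaxlen (m : List (String × List String)) : Int :=
  m.foldl (fun a p => max a (p.2.length : Int)) (-1)

lemma pvFoldlMax_init (l : List (String × List String)) (i j : Int) :
    l.foldl (fun a p => max a (p.2.length : Int)) (max i j)
      = max i (l.foldl (fun a p => max a (p.2.length : Int)) j) := by
  induction l generalizing j with
  | nil => simp
  | cons p t ih =>
      simp only [List.foldl_cons, max_assoc]
      exact ih _

lemma pvMaxlen_cons (p : String × List String) (t : List (String × List String)) :
    pvMaxlen (p :: t) = max (p.2.length : Int) (pvMaxlen t) := by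
  unfold pvMaxlen
  simp only [List.foldl_cons]
  have h : max (-1 : Int) (p.2.length : Int) = max (p.2.length : Int) (-1) := max_comm _ _
  rw [h, pvFoldlMax_init]

lemma pvMaxlen_ge (m : List (String × List String)) : -1 ≤ pvMaxlen m := by
  induction m with
  | nil => simp [pvMaxlen]
  | cons p t ih => rw [pvMaxlen_cons]; omega

lemma pvMaxlen_mem_le (m : List (String × List String)) (p : String × List String)
    (h : p ∈ m) : (p.2.length : Int) ≤ pvMaxlen m := by
  induction m with
  | nil => cases h
  | cons q t ih =>
      rw [pvMaxlen_cons]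
      rcases List.mem_cons.mp h with h | h
      · subst h; omega
      · have := ih h; omega

-- B's single-pass fold, characterised
lemma pvFoldB (l : List (String × List String)) (mx : Int) (acc : List String)
    (hmx : -1 ≤ mx) :
    l.foldl (fun (st : Int × List String) p =>
        let n : Int := p.2.length
        if st.1 < n then (n, [p.1])
        else if n == st.1 then (st.1, st.2 ++ [p.1])
        else st) (mx, acc)
      = (max mx (pvMaxlen l),
         (if pvMaxlen l ≤ mx then acc else [])
           ++ (l.filter (fun p => (p.2.length : Int) == max mx (pvMaxlen l))).map Prod.fst) := by
  induction l generalizing mx acc with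
  | nil =>
      simp [pvMaxlen]
      omega
  | cons p t ih =>
      have hmt := pvMaxlen_ge t
      simp only [List.foldl_cons, pvMaxlen_cons, List.filter_cons]
      by_cases h1 : mx < (p.2.length : Int)
      · rw [if_pos h1, ih _ _ (by omega)]
        have hmax : max mx (max (p.2.length : Int) (pvMaxlen t)) = max (p.2.length : Int) (pvMaxlen t) := by omega
        rw [hmax]
        have hneg : ¬ max (p.2.length : Int) (pvMaxlen t) ≤ mx := by omega
        rw [if_neg hneg]
        by_cases h2 : pvMaxlen t ≤ (p.2.length : Int)
        · have : ((p.2.length : Int) == max (p.2.length : Int) (pvMaxlen t)) = true := by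
            simp; omega
          rw [if_pos h2, this]
          simp [show max (p.2.length : Int) (pvMaxlen t) = (p.2.length : Int) by omega]
        · have : ((p.2.length : Int) == max (p.2.length : Int) (pvMaxlen t)) = false := by
            simp; omega
          rw [if_neg h2, this]
          simp [show max (p.2.length : Int) (pvMaxlen t) = pvMaxlen t by omega]
      · rw [if_neg h1]
        by_cases h2 : ((p.2.length : Int) == mx)
        · have hpe : (p.2.length : Int) = mx := by simpa using h2
          rw [if_pos h2, ih _ _ hmx]
          have hm1 : max mx (max (p.2.length : Int) (pvMaxlen t)) = max mx (pvMaxlen t) := by omega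
          rw [hm1]
          by_cases h3 : pvMaxlen t ≤ mx
          · have : ((p.2.length : Int) == max mx (pvMaxlen t)) = true := by simp; omega
            rw [this]
            simp only [if_pos h3, if_pos (show max (p.2.length : Int) (pvMaxlen t) ≤ mx by omega)]
            simp
          · have : ((p.2.length : Int) == max mx (pvMaxlen t)) = false := by simp; omega
            rw [this]
            simp only [if_neg h3, if_neg (show ¬ max (p.2.length : Int) (pvMaxlen t) ≤ mx by omega)]
            simp
        · have hpl : (p.2.length : Int) < mx := by
            simp only [beq_iff_eq] at h2; omega
          rw [if_neg h2, ih _ _ hmx]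
          have hm1 : max mx (max (p.2.length : Int) (pvMaxlen t)) = max mx (pvMaxlen t) := by omega
          rw [hm1]
          have : ((p.2.length : Int) == max mx (pvMaxlen t)) = false := by simp; omega
          rw [this]
          have hiff : max (p.2.length : Int) (pvMaxlen t) ≤ mx ↔ pvMaxlen t ≤ mx := by omega
          by_cases h3 : pvMaxlen t ≤ mx
          · simp only [if_pos h3, if_pos (hiff.mpr h3)]
            simp
          · simp only [if_neg h3, if_neg (fun h => h3 (hiff.mp h))]
            simp

lemma pvAltEq (m : List (String × List String)) :
    select_max_books_alt m
      = (m.filter (fun p => (p.2.length : Int) == pvMaxlen m)).map Prod.fst := by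
  unfold select_max_books_alt
  rw [pvFoldB m (-1) [] le_rfl]
  have hge := pvMaxlen_ge m
  have : max (-1 : Int) (pvMaxlen m) = pvMaxlen m := by omega
  rw [this]
  split_ifs <;> simp

-- first-match lookup of a key of m returns its own value, when keys are unique
lemma pvLookup_self (m : List (String × List String)) (hnd : (m.map Prod.fst).Nodup)
    (p : String × List String) (hp : p ∈ m) : pyDictLookup m p.1 = p.2 := by
  induction m with
  | nil => cases hp
  | cons q t ih =>
      simp only [List.map_cons, List.nodup_cons] at hnd
      rcases List.mem_cons.mp hp with h | h
      · subst h
        simp [pyDictLookup, List.find?]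
      · have hne : q.1 ≠ p.1 := by
          intro he
          exact hnd.1 (he ▸ (List.mem_map.mpr ⟨p, h, rfl⟩))
        have := ih hnd.2 h
        simp only [pyDictLookup, List.find?] at this ⊢
        rw [show (q.1 == p.1) = false by simpa using hne]
        exact this

lemma pvFoldMax_keys (m l : List (String × List String)) (i : Int)
    (hl : ∀ q ∈ l, pyDictLookup m q.1 = q.2) :
    (l.map Prod.fst).foldl
      (fun mx c => if mx < ((pyDictLookup m c).length : Int)
                   then ((pyDictLookup m c).length : Int) else mx) i
      = l.foldl (fun a p => max a (p.2.length : Int)) i := by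
  induction l generalizing i with
  | nil => rfl
  | cons q t ih =>
      simp only [List.map_cons, List.foldl_cons]
      rw [hl q (List.mem_cons_self ..)]
      have hstep : (if i < ((q.2.length : Int)) then ((q.2.length : Int)) else i)
          = max i (q.2.length : Int) := by omega
      rw [hstep]
      exact ih _ (fun r hr => hl r (List.mem_cons_of_mem _ hr))

lemma pvFoldFilter_keys (m l : List (String × List String)) (M : Int) (acc : List String)
    (hl : ∀ q ∈ l, pyDictLookup m q.1 = q.2) :
    (l.map Prod.fst).foldl
      (fun acc c => if M == ((pyDictLookup m c).length : Int) then acc ++ [c] else acc) acc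
      = acc ++ (l.filter (fun p => (p.2.length : Int) == M)).map Prod.fst := by
  induction l generalizing acc with
  | nil => simp
  | cons q t ih =>
      simp only [List.map_cons, List.foldl_cons, List.filter_cons]
      rw [hl q (List.mem_cons_self ..)]
      have hl' := fun r hr => hl r (List.mem_cons_of_mem _ hr)
      by_cases h : (q.2.length : Int) = M
      · rw [show (M == ((q.2.length : Int))) = true by simp [h],
            show (((q.2.length : Int)) == M) = true by simp [h]]
        rw [if_pos rfl, ih _ hl']
        simp
      · rw [show (M == ((q.2.length : Int))) = false by simp; omega,
            show (((q.2.length : Int)) == M) = false by simp [h]]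
        exact ih _ hl'

-- ===== VERDICT (by name: the statement is the Claim_ definition above) =====
theorem select_max_books_spec : Claim_equal_select_max_books := by
  intro m _ hpre
  obtain ⟨hne, hnd⟩ := hpre
  unfold Spec_select_max_books
  obtain ⟨p0, t, rfl⟩ : ∃ p0 t, m = p0 :: t := by
    cases m with
    | nil => exact absurd rfl hne
    | cons a b => exact ⟨a, b, rfl⟩
  have hlk : ∀ q ∈ p0 :: t, pyDictLookup (p0 :: t) q.1 = q.2 :=
    fun q hq => pvLookup_self _ hnd q hq
  unfold select_max_books
  rw [show PySem.List.pyGet? ((p0 :: t).map Prod.fst) 0 = some p0.1 by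
        simp [PySem.List.pyGet?, PySem.List.pyIdx?]]
  simp only
  rw [hlk p0 (List.mem_cons_self ..)]
  rw [pvFoldMax_keys _ _ _ hlk]
  have hmaxB : (p0 :: t).foldl (fun a p => max a (p.2.length : Int)) (p0.2.length : Int)
      = pvMaxlen (p0 :: t) := by
    have h0 : ((p0.2.length : Int)) = max ((p0.2.length : Int)) (-1) := by omega
    rw [h0, pvFoldlMax_init]
    exact max_eq_right (pvMaxlen_mem_le (p0 :: t) p0 (List.mem_cons_self ..))
  rw [hmaxB, pvFoldFilter_keys _ _ _ _ hlk, pvAltEq]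
  simp

@[simp] theorem select_max_books_raises : Claim_raises_select_max_books := by
  unfold Claim_raises_select_max_books
  constructor
  · intro m _ hr hpre
    exact hpre.1 hr
  · exact ⟨by decide, rfl, by decide⟩
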